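-- pv_equiv track=rewrite | github.com/reemismail98/python_stack | algorithm skyline.py | skyline
-- ===== SOURCE A (Python) =====
-- def skyline(arr):
--     min=0
--     list=[]
--     for x in range(0,len(arr)):
--         if arr[x] > min:
--             list.append(arr[x])
--             min=arr[x]
--     return list
-- ===== SOURCE B (Python) =====
-- def skyline(arr):
--     # Divide and conquer: visible elements of a segment above a threshold t are the
--     # visible elements of its left half above t, followed by the visible elements of
--     # its right half above the (updated) maximum coming out of the left half.
--     def vis(seg, t):
--         # returns (visible elements of seg above threshold t, updated threshold)
--         if not seg:
--             return [], t
--         if len(seg) == 1: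
--             x = seg[0]
--             return ([x], x) if x > t else ([], t)
--         mid = len(seg) // 2
--         left, m = vis(seg[:mid], t)
--         right, m2 = vis(seg[mid:], m)
--         return left + right, m2
--     return vis(arr, 0)[0]
-- ===== Notes on version B (the rewrite author's own statement) =====
-- stated objective: alternative
-- what changed: replaces A's single left-to-right loop threading a running-max accumulator by a divide-and-conquer recursion: split the list at its midpoint, take the visible elements of the left half above the threshold, then those of the right half above the maximum coming out of the left half
import Mathlib
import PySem

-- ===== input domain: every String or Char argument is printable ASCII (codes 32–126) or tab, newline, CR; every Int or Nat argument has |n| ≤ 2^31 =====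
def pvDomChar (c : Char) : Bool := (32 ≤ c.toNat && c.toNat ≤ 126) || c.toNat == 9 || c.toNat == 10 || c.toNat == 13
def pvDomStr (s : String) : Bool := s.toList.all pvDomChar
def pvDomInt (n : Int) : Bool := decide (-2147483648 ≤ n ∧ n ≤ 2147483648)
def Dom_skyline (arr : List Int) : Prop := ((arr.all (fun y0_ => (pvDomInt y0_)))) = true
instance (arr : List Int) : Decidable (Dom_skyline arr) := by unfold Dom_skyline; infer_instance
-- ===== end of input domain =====

-- B replaces A's single left-to-right loop with a running-max accumulator by a
-- divide-and-conquer recursion on halves of the list (a different decomposition).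

-- ===== PORT A =====
-- for x in range(0, len(arr)): if arr[x] > min: list.append(arr[x]); min = arr[x]
def skyline (arr : List Int) : List Int :=
  ((PySem.List.pyRange 0 (PySem.List.len arr) 1).foldl
    (fun (st : Int × List Int) x =>
      if PySem.List.pyGetD arr x 0 > st.1
      then (PySem.List.pyGetD arr x 0, st.2 ++ [PySem.List.pyGetD arr x 0])
      else st) (0, [])).2

-- ===== PORT B =====
-- vis(seg, t): (visible elements of seg above threshold t, updated threshold);
-- splits seg at len(seg)//2, recurses on seg[:mid] with t and on seg[mid:] with
-- the max coming out of the left half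
def vis (seg : List Int) (t : Int) : List Int × Int :=
  if seg = [] then ([], t)
  else if PySem.List.len seg = 1 then
    if PySem.List.pyGetD seg 0 0 > t
    then ([PySem.List.pyGetD seg 0 0], PySem.List.pyGetD seg 0 0)
    else ([], t)
  else
    let mid := PySem.Int.floordiv (PySem.List.len seg) 2
    let l := vis (PySem.List.slice seg none (some mid)) t
    let r := vis (PySem.List.slice seg (some mid) none) l.2
    (l.1 ++ r.1, r.2)
termination_by seg.length
decreasing_by
  all_goals
    rename_i h0 h1
    have hlen : 2 ≤ seg.length := by
      have h0' : seg.length ≠ 0 := by simpa using (fun h => h0 (List.eq_nil_of_length_eq_zero h))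
      have h1' : (seg.length : Int) ≠ 1 := by simpa [PySem.List.len_eq] using h1
      omega
    have hml : PySem.Int.floordiv (PySem.List.len seg) 2 = ((seg.length / 2 : Nat) : Int) := by
      rw [PySem.List.len_eq]
      exact_mod_cast PySem.Int.floordiv_natCast seg.length 2
    rw [hml]
    first
      | rw [PySem.List.slice_to_natCast]; simp; omega
      | rw [PySem.List.slice_from_natCast]; simp; omega

-- skyline(arr) = vis(arr, 0)[0]
def skyline_alt (arr : List Int) : List Int := (vis arr 0).1

-- ===== PRECONDITION & SPEC =====
def Spec_skyline (arr : List Int) (out : List Int) : Prop := out = skyline_alt arr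
instance (arr : List Int) (out : List Int) : Decidable (Spec_skyline arr out) := by unfold Spec_skyline; infer_instance

-- ===== CLAIM (what is proved, stated in full; the proofs are below) =====
def Claim_equal_skyline : Prop := ∀ (arr : List Int), Dom_skyline arr → Spec_skyline arr (skyline arr)

-- ===== LEMMAS AND PROOFS =====

-- canonical recursive form of the record-high selection with threshold t
def skyRec (xs : List Int) (t : Int) : List Int :=
  match xs with
  | [] => []
  | x :: rest => if t < x then x :: skyRec rest x else skyRec rest t

theorem skyline_fold_eq (arr : List Int) : ∀ (mn : Int) (acc : List Int),
    (arr.foldl (fun (st : Int × List Int) v =>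
        if v > st.1 then (v, st.2 ++ [v]) else st) (mn, acc)).2
      = acc ++ skyRec arr mn := by
  induction arr with
  | nil => simp [skyRec]
  | cons x xs ih =>
    intro mn acc
    by_cases h : mn < x
    · simp [skyRec, h, ih]
    · simp [skyRec, h, ih]

theorem skyRec_append (l r : List Int) : ∀ (t : Int),
    skyRec (l ++ r) t = skyRec l t ++ skyRec r (List.foldl max t l) := by
  induction l with
  | nil => simp [skyRec]
  | cons x xs ih =>
    intro t
    by_cases h : t < x
    · simp [skyRec, h, ih, max_eq_right h.le]
    · simp [skyRec, h, ih, max_eq_left (not_lt.mp h)]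

theorem vis_eq (n : Nat) : ∀ (seg : List Int) (t : Int), seg.length ≤ n →
    vis seg t = (skyRec seg t, List.foldl max t seg) := by
  induction n with
  | zero =>
    intro seg t h
    have hs : seg = [] := List.eq_nil_of_length_eq_zero (Nat.le_zero.mp h)
    rw [vis]
    simp [hs, skyRec]
  | succ n ih =>
    intro seg t h
    rw [vis]
    by_cases h0 : seg = []
    · simp [h0, skyRec]
    by_cases h1 : PySem.List.len seg = 1
    · have hl1 : seg.length = 1 := by
        have := h1; rw [PySem.List.len_eq] at this; exact_mod_cast this
      obtain ⟨x, hx⟩ := List.length_eq_one_iff.mp hl1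
      subst hx
      by_cases ht : t < x
      · simp [skyRec, PySem.List.pyGetD_zero_cons, ht, max_eq_right ht.le]
      · simp [skyRec, PySem.List.pyGetD_zero_cons, ht, max_eq_left (not_lt.mp ht)]
    · have hlen : 2 ≤ seg.length := by
        have h0' : seg.length ≠ 0 := by
          simpa using (fun hh => h0 (List.eq_nil_of_length_eq_zero hh))
        have h1' : (seg.length : Int) ≠ 1 := by simpa [PySem.List.len_eq] using h1
        omega
      have hml : PySem.Int.floordiv (PySem.List.len seg) 2 = ((seg.length / 2 : Nat) : Int) := by
        rw [PySem.List.len_eq]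
        exact_mod_cast PySem.Int.floordiv_natCast seg.length 2
      simp only [h0, h1, if_false, hml, PySem.List.slice_to_natCast, PySem.List.slice_from_natCast]
      have htk : (seg.take (seg.length / 2)).length ≤ n := by simp; omega
      have hdp : (seg.drop (seg.length / 2)).length ≤ n := by simp; omega
      rw [ih _ t htk, ih _ _ hdp]
      dsimp only
      have hsplit : seg.take (seg.length / 2) ++ seg.drop (seg.length / 2) = seg :=
        List.take_append_drop _ seg
      rw [Prod.mk.injEq]
      refine ⟨?_, ?_⟩
      · rw [← hsplit]
        rw [skyRec_append]
        simp
      · rw [← hsplit]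
        rw [List.foldl_append]
        simp

-- ===== VERDICT (by name: the statement is the Claim_ definition above) =====
theorem skyline_spec : Claim_equal_skyline := by
  intro arr _
  show skyline arr = skyline_alt arr
  unfold skyline skyline_alt
  rw [PySem.List.foldl_pyRange_zero_pyGetD arr 0
        (fun (st : Int × List Int) v => if v > st.1 then (v, st.2 ++ [v]) else st) (0, [])]
  rw [skyline_fold_eq arr 0 [], vis_eq arr.length arr 0 (le_refl _)]
  simp
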